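-- pv_equiv track=rewrite | github.com/vsriv9394/pySuite | pymake/make.py | pyType
-- ===== SOURCE A (Python) =====
-- def pyType(token):
--
--     if token=='char*':
--         return 'C.c_char_p'
--
--     elif token=='void*':
--         return 'C.c_void_p'
--
--     elif token[-1]=='*':
--         return 'C.POINTER(' + pyType(token[:-1]) + ')'
--
--     elif token in ['int', 'double', 'char']:
--         return 'C.c_'+token
--
--     else: return token
-- ===== SOURCE B (Python) =====
-- def pyType(token):
--     core = token.rstrip('*')
--     k = len(token) - len(core)
--     if k >= 1 and core in ('char', 'void'):
--         base = 'C.c_char_p' if core == 'char' else 'C.c_void_p'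
--         k -= 1
--     elif core in ('int', 'double', 'char'):
--         base = 'C.c_' + core
--     else:
--         base = core
--     return 'C.POINTER(' * k + base + ')' * k
-- ===== Notes on version B (the rewrite author's own statement) =====
-- stated objective: alternative
-- what changed: Replaced A's per-star recursion with a closed form: strip all trailing stars at once, count them, and build the answer in one step by string repetition of 'C.POINTER(' and ')'.
import Mathlib
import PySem

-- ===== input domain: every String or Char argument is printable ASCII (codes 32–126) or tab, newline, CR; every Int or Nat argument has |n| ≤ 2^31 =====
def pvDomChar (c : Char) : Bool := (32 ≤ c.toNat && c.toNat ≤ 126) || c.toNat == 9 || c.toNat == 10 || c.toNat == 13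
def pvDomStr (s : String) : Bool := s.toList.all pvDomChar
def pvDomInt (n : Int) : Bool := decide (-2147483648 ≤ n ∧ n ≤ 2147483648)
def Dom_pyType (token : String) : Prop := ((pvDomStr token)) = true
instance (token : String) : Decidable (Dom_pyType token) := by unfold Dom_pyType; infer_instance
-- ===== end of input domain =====

-- B replaces A's per-star recursion by a closed form: strip the trailing stars at once, count them,
-- and build the result in one step (alternative decomposition, linear instead of re-slicing per level).

-- ===== PORT A =====
-- A's recursion, on List Char (token[-1] = pyGet? · (-1); token[:-1] = slice · none (some (-1)))
def pyTypeChA (t : List Char) : List Char :=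
  if t = "char*".toList then "C.c_char_p".toList
  else if t = "void*".toList then "C.c_void_p".toList
  else if PySem.List.pyGet? t (-1) = some '*' then
    "C.POINTER(".toList ++ pyTypeChA (PySem.List.slice t none (some (-1))) ++ ")".toList
  else if t = "int".toList ∨ t = "double".toList ∨ t = "char".toList then "C.c_".toList ++ t
  else t
termination_by t.length
decreasing_by
  rename_i h1 h2 h3
  have hne : t ≠ [] := by
    intro he; subst he; simp [PySem.List.pyGet?] at h3
  have hpos : 0 < t.length := List.length_pos_of_ne_nil hne
  simp [PySem.List.slice_to_neg_one]
  omega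

def pyType (token : String) : String := String.ofList (pyTypeChA token.toList)

-- ===== PORT B =====
-- hand port of token.rstrip('*') (PySem has no per-char rstrip): drop the '*'-run from the reversed list; exact
def rstripStars (t : List Char) : List Char := (t.reverse.dropWhile (fun c => c = '*')).reverse

def pyTypeChB (t : List Char) : List Char :=
  let core := rstripStars t
  let k := t.length - core.length
  if 1 ≤ k ∧ (core = "char".toList ∨ core = "void".toList) then
    (List.replicate (k - 1) "C.POINTER(".toList).flatten ++
      (if core = "char".toList then "C.c_char_p".toList else "C.c_void_p".toList) ++
      List.replicate (k - 1) ')'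
  else
    (List.replicate k "C.POINTER(".toList).flatten ++
      (if core = "int".toList ∨ core = "double".toList ∨ core = "char".toList
       then "C.c_".toList ++ core else core) ++
      List.replicate k ')'

def pyType_alt (token : String) : String := String.ofList (pyTypeChB token.toList)

-- ===== PRECONDITION & SPEC =====
-- Pre_ excludes exactly the tokens made only of '*' (including ''), on which A raises IndexError.
def Pre_pyType (token : String) : Prop := token.toList.any (fun c => c ≠ '*') = true
instance (token : String) : Decidable (Pre_pyType token) := by unfold Pre_pyType; infer_instance
def pvWitness_pyType : String := "int*"

def Spec_pyType (token : String) (out : String) : Prop := out = pyType_alt token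
instance (token : String) (out : String) : Decidable (Spec_pyType token out) := by unfold Spec_pyType; infer_instance

-- ===== CLAIM (what is proved, stated in full; the proofs are below) =====
def Claim_equal_pyType : Prop := ∀ (token : String), Dom_pyType token → Pre_pyType token → Spec_pyType token (pyType token)

-- ===== LEMMAS AND PROOFS =====

-- B's else-branch base, = A's value on a token with no trailing star
def baseOf (core : List Char) : List Char :=
  if core = "int".toList ∨ core = "double".toList ∨ core = "char".toList
  then "C.c_".toList ++ core else core

theorem base_eq (core : List Char) (hne : core ≠ []) (hlast : core.getLast? ≠ some '*') :
    pyTypeChA core = baseOf core := by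
  rw [pyTypeChA]
  have h1 : core ≠ "char*".toList := by rintro rfl; exact hlast (by decide)
  have h2 : core ≠ "void*".toList := by rintro rfl; exact hlast (by decide)
  have h3 : ¬ (PySem.List.pyGet? core (-1) = some '*') := by
    rw [PySem.List.pyGet?_neg_one]; exact hlast
  simp only [h1, h2, h3, if_false, baseOf]

theorem getLast?_append_replicate_succ (l : List Char) (j : ℕ) (a : Char) :
    (l ++ List.replicate (j + 1) a).getLast? = some a := by
  rw [List.replicate_succ', ← List.append_assoc, List.getLast?_concat]

theorem ne_word (core : List Char) (k : ℕ) (w : List Char) (hw : w.getLast? ≠ some '*')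
    (hc : core ≠ w) : core ++ List.replicate (k + 1) '*' ≠ w ++ ['*'] := by
  intro h
  have h' : core ++ List.replicate k '*' = w := by
    have := congrArg List.dropLast h
    simpa [List.replicate_succ', ← List.append_assoc] using this
  cases k with
  | zero => simp at h'; exact hc h'
  | succ j =>
    apply hw
    rw [← h', getLast?_append_replicate_succ]

theorem wrap (core : List Char) (hc : core ≠ "char".toList) (hv : core ≠ "void".toList) (k : ℕ) :
    pyTypeChA (core ++ List.replicate k '*') =
      (List.replicate k "C.POINTER(".toList).flatten ++ pyTypeChA core ++ List.replicate k ')' := by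
  induction k with
  | zero => simp
  | succ j ih =>
    rw [pyTypeChA]
    have h1 : core ++ List.replicate (j + 1) '*' ≠ "char*".toList :=
      ne_word core j "char".toList (by decide) hc
    have h2 : core ++ List.replicate (j + 1) '*' ≠ "void*".toList :=
      ne_word core j "void".toList (by decide) hv
    have h3 : PySem.List.pyGet? (core ++ List.replicate (j + 1) '*') (-1) = some '*' := by
      rw [PySem.List.pyGet?_neg_one, getLast?_append_replicate_succ]
    have h4 : PySem.List.slice (core ++ List.replicate (j + 1) '*') none (some (-1)) =
        core ++ List.replicate j '*' := by
      rw [PySem.List.slice_to_neg_one, List.replicate_succ', ← List.append_assoc,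
        List.dropLast_concat]
    simp only [h1, h2, h3, h4, if_false, if_pos, ih]
    have hrep : List.replicate j ')' ++ [')'] = ')' :: List.replicate j ')' := by
      rw [← List.replicate_succ', List.replicate_succ]
    simp [List.replicate_succ, hrep, List.append_assoc]

theorem wrap_char (k : ℕ) :
    pyTypeChA ("char".toList ++ List.replicate (k + 1) '*') =
      (List.replicate k "C.POINTER(".toList).flatten ++ "C.c_char_p".toList ++
        List.replicate k ')' := by
  induction k with
  | zero =>
    have : "char".toList ++ List.replicate 1 '*' = "char*".toList := by decide
    rw [this, pyTypeChA]; simp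
  | succ j ih =>
    rw [pyTypeChA]
    have h1 : "char".toList ++ List.replicate (j + 2) '*' ≠ "char*".toList := by
      intro h; have := congrArg List.length h; simp at this
    have h2 : "char".toList ++ List.replicate (j + 2) '*' ≠ "void*".toList := by
      intro h; have := congrArg List.length h; simp at this
    have h3 : PySem.List.pyGet? ("char".toList ++ List.replicate (j + 2) '*') (-1) = some '*' := by
      rw [PySem.List.pyGet?_neg_one, getLast?_append_replicate_succ]
    have h4 : PySem.List.slice ("char".toList ++ List.replicate (j + 2) '*') none (some (-1)) =
        "char".toList ++ List.replicate (j + 1) '*' := by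
      rw [PySem.List.slice_to_neg_one, List.replicate_succ' (n := j + 1), ← List.append_assoc,
        List.dropLast_concat]
    simp only [h1, h2, h3, h4, if_false, if_pos, ih]
    have hrep : List.replicate j ')' ++ [')'] = ')' :: List.replicate j ')' := by
      rw [← List.replicate_succ', List.replicate_succ]
    simp [List.replicate_succ, hrep, List.append_assoc]

theorem wrap_void (k : ℕ) :
    pyTypeChA ("void".toList ++ List.replicate (k + 1) '*') =
      (List.replicate k "C.POINTER(".toList).flatten ++ "C.c_void_p".toList ++
        List.replicate k ')' := by
  induction k with
  | zero =>
    have : "void".toList ++ List.replicate 1 '*' = "void*".toList := by decide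
    rw [this, pyTypeChA]; simp
  | succ j ih =>
    rw [pyTypeChA]
    have h1 : "void".toList ++ List.replicate (j + 2) '*' ≠ "char*".toList := by
      intro h; have := congrArg List.length h; simp at this
    have h2 : "void".toList ++ List.replicate (j + 2) '*' ≠ "void*".toList := by
      intro h; have := congrArg List.length h; simp at this
    have h3 : PySem.List.pyGet? ("void".toList ++ List.replicate (j + 2) '*') (-1) = some '*' := by
      rw [PySem.List.pyGet?_neg_one, getLast?_append_replicate_succ]
    have h4 : PySem.List.slice ("void".toList ++ List.replicate (j + 2) '*') none (some (-1)) =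
        "void".toList ++ List.replicate (j + 1) '*' := by
      rw [PySem.List.slice_to_neg_one, List.replicate_succ' (n := j + 1), ← List.append_assoc,
        List.dropLast_concat]
    simp only [h1, h2, h3, h4, if_false, if_pos, ih]
    have hrep : List.replicate j ')' ++ [')'] = ')' :: List.replicate j ')' := by
      rw [← List.replicate_succ', List.replicate_succ]
    simp [List.replicate_succ, hrep, List.append_assoc]

-- decomposition produced by rstripStars: t = core ++ stars, core not ending in '*'
theorem rstrip_decomp (t : List Char) :
    t = rstripStars t ++ List.replicate (t.length - (rstripStars t).length) '*' ∧
      (rstripStars t).getLast? ≠ some '*' := by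
  unfold rstripStars
  have hsplit : t.reverse = t.reverse.takeWhile (fun c => c = '*') ++
      t.reverse.dropWhile (fun c => c = '*') := (List.takeWhile_append_dropWhile).symm
  have hrep : (t.reverse.takeWhile (fun c => c = '*')) =
      List.replicate (t.reverse.takeWhile (fun c => c = '*')).length '*' := by
    apply List.eq_replicate_of_mem
    intro b hb
    have := List.mem_takeWhile_imp hb
    simpa using this
  constructor
  · conv_lhs => rw [← t.reverse_reverse, hsplit]
    rw [List.reverse_append]
    congr 1
    rw [hrep, List.reverse_replicate]
    congr 1
    have hlen := congrArg List.length hsplit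
    rw [List.length_append, List.length_reverse] at hlen
    simp
    omega
  · rw [List.getLast?_reverse]
    cases hd : t.reverse.dropWhile (fun c => c = '*') with
    | nil => simp
    | cons x xs =>
      have hx := List.head?_dropWhile_not (fun c => decide (c = '*')) t.reverse
      rw [hd] at hx
      simp at hx
      simp [hx]

-- ===== VERDICT (by name: the statement is the Claim_ definition above) =====
theorem pyType_spec : Claim_equal_pyType := by
  intro token _ hpre
  unfold Spec_pyType pyType pyType_alt
  congr 1
  obtain ⟨hdec, hlast⟩ := rstrip_decomp token.toList
  set core := rstripStars token.toList with hcore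
  set k := token.toList.length - core.length with hk
  have hne : core ≠ [] := by
    intro hnil
    unfold Pre_pyType at hpre
    rw [List.any_eq_true] at hpre
    obtain ⟨c, hc, hcne⟩ := hpre
    rw [hdec, hnil] at hc
    simp at hc
    simp [hc] at hcne
  rw [pyTypeChB]
  simp only [← hcore, ← hk]
  conv_lhs => rw [hdec]
  by_cases hcond : 1 ≤ k ∧ (core = "char".toList ∨ core = "void".toList)
  · rw [if_pos hcond]
    obtain ⟨hk1, hcv⟩ := hcond
    obtain ⟨j, hj⟩ : ∃ j, k = j + 1 := ⟨k - 1, by omega⟩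
    rcases hcv with hch | hvo
    · rw [hch, if_pos rfl, hj, wrap_char]
      simp
    · rw [hvo, if_neg (by decide : ¬("void".toList = "char".toList)), hj, wrap_void]
      simp
  · rw [if_neg hcond]
    push_neg at hcond
    by_cases hk1 : 1 ≤ k
    · have hcv := hcond hk1
      rw [wrap core hcv.1 hcv.2 k, base_eq core hne hlast, baseOf]
    · have hk0 : k = 0 := by omega
      rw [hk0]
      simp [base_eq core hne hlast, baseOf]
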